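-- pv_equiv track=rewrite | github.com/bobzhang/yaml | scripts/run_yaml_suite.py | parse_props
-- ===== SOURCE A (Python) =====
-- def parse_props(tokens):
--     anchor = None
--     tag = None
--     for token in tokens:
--         if token in ("[]", "{}"):
--             continue
--         if token.startswith("&"):
--             anchor = token[1:]
--             continue
--         if token.startswith("<") and token.endswith(">"):
--             tag = token[1:-1]
--             continue
--         if token.startswith("!") and len(token) > 0:
--             tag = token
--             continue
--     return anchor, tag
-- ===== SOURCE B (Python) =====
-- def parse_props(tokens):
--     toks = list(tokens)
--     anchor = next((t[1:] for t in reversed(toks) if t.startswith("&")), None)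
--     tag = next((t[1:-1] if t.startswith("<") else t
--                 for t in reversed(toks)
--                 if (t.startswith("<") and t.endswith(">")) or t.startswith("!")),
--                None)
--     return anchor, tag
-- ===== Notes on version B (the rewrite author's own statement) =====
-- stated objective: alternative
-- what changed: Replaces A's single forward accumulator pass (last write wins) with two independent backward first-match searches over the reversed token list, dropping the redundant '[]'/'{}' skip and len guard.
import Mathlib
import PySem

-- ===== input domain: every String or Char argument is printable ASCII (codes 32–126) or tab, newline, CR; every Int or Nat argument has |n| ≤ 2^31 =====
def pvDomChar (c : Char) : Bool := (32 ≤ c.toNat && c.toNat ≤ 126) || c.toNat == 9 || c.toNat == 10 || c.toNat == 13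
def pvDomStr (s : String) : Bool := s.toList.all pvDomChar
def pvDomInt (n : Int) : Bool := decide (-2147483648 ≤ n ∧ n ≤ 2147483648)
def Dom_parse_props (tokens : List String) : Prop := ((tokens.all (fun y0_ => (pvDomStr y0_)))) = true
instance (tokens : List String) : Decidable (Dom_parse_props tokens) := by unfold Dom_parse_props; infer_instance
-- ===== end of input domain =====

-- B replaces A's forward last-write-wins accumulator pass by two backward first-match
-- searches over the reversed token list (same result, different decomposition).

-- ===== PORT A =====
def pvStepA (st : Option String × Option String) (token : String) : Option String × Option String :=
  if token == "[]" || token == "{}" then st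
  else if PySem.Str.startswith token "&" then
    (some (PySem.Str.slice token (some 1) none), st.2)
  else if PySem.Str.startswith token "<" && PySem.Str.endswith token ">" then
    (st.1, some (PySem.Str.slice token (some 1) (some (-1))))
  else if PySem.Str.startswith token "!" && decide (0 < PySem.Str.len token) then
    (st.1, some token)
  else st

def parse_props (tokens : List String) : Option String × Option String :=
  tokens.foldl pvStepA (none, none)

-- ===== PORT B =====
-- first token of the list starting with '&', yielding token[1:]
def pvFirstAnchor : List String → Option String
  | [] => none
  | t :: ts =>
    if PySem.Str.startswith t "&" then some (PySem.Str.slice t (some 1) none)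
    else pvFirstAnchor ts

-- first token of the list that is '<...>' (yield token[1:-1]) or starts with '!' (yield token)
def pvFirstTag : List String → Option String
  | [] => none
  | t :: ts =>
    if (PySem.Str.startswith t "<" && PySem.Str.endswith t ">") || PySem.Str.startswith t "!" then
      some (if PySem.Str.startswith t "<" then PySem.Str.slice t (some 1) (some (-1)) else t)
    else pvFirstTag ts

def parse_props_alt (tokens : List String) : Option String × Option String :=
  let toks := tokens.reverse
  (pvFirstAnchor toks, pvFirstTag toks)

-- ===== PRECONDITION & SPEC =====
def Spec_parse_props (tokens : List String) (out : Option String × Option String) : Prop := out = parse_props_alt tokens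
instance (tokens : List String) (out : Option String × Option String) : Decidable (Spec_parse_props tokens out) := by unfold Spec_parse_props; infer_instance

-- ===== CLAIM (what is proved, stated in full; the proofs are below) =====
def Claim_equal_parse_props : Prop := ∀ (tokens : List String), Dom_parse_props tokens → Spec_parse_props tokens (parse_props tokens)

-- ===== LEMMAS AND PROOFS =====

-- a nonempty prefix determines the head character
theorem pvHead_of_sw (l : List Char) (c : Char)
    (h : PySem.Chars.startswith l [c] = true) : l.head? = some c := by
  rw [PySem.Chars.startswith_iff] at h
  obtain ⟨r, hr⟩ := h
  rw [← hr]; simp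

theorem pvSw_disj (l : List Char) (c d : Char) (hcd : c ≠ d)
    (h : PySem.Chars.startswith l [c] = true) :
    ¬ PySem.Chars.startswith l [d] = true := by
  intro h'
  have hd := pvHead_of_sw l d h'
  have hc := pvHead_of_sw l c h
  rw [hc] at hd
  exact hcd (Option.some.inj hd)

theorem pvSw_len (l : List Char) (c : Char)
    (h : PySem.Chars.startswith l [c] = true) : 0 < l.length := by
  have := pvHead_of_sw l c h
  cases l with
  | nil => simp at this
  | cons x xs => simp

theorem pvFirstAnchor_append (xs ys : List String) :
    pvFirstAnchor (xs ++ ys) = (pvFirstAnchor xs).or (pvFirstAnchor ys) := by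
  induction xs with
  | nil => simp [pvFirstAnchor]
  | cons t ts ih =>
    simp only [List.cons_append, pvFirstAnchor]
    split <;> simp [ih]

theorem pvFirstTag_append (xs ys : List String) :
    pvFirstTag (xs ++ ys) = (pvFirstTag xs).or (pvFirstTag ys) := by
  induction xs with
  | nil => simp [pvFirstTag]
  | cons t ts ih =>
    simp only [List.cons_append, pvFirstTag]
    split <;> simp [ih]

theorem pvStep_fst (a g : Option String) (t : String) :
    (pvFirstAnchor [t]).or a = (pvStepA (a, g) t).1 := by
  by_cases hb : (t == "[]" || t == "{}") = true
  · have ht : t = "[]" ∨ t = "{}" := by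
      rcases Bool.or_eq_true_iff.mp hb with h | h
      · exact Or.inl (eq_of_beq h)
      · exact Or.inr (eq_of_beq h)
    rcases ht with h | h <;> subst h <;> simp [pvStepA, pvFirstAnchor] <;> rw [if_neg (by decide)] <;> simp
  · by_cases h1 : PySem.Chars.startswith t.toList ['&'] = true
    · simp [pvStepA, pvFirstAnchor, hb, h1]
    · by_cases h2 : PySem.Chars.startswith t.toList ['<'] = true ∧
          PySem.Chars.endswith t.toList ['>'] = true
      · simp [pvStepA, pvFirstAnchor, hb, h1, h2]
      · by_cases h3 : PySem.Chars.startswith t.toList ['!'] = true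
        · have hlen : 0 < t.length := pvSw_len t.toList '!' h3
          simp [pvStepA, pvFirstAnchor, hb, h1, h2, h3, hlen]
        · simp [pvStepA, pvFirstAnchor, hb, h1, h2, h3]

theorem pvStep_snd (a g : Option String) (t : String) :
    (pvFirstTag [t]).or g = (pvStepA (a, g) t).2 := by
  by_cases hb : (t == "[]" || t == "{}") = true
  · have ht : t = "[]" ∨ t = "{}" := by
      rcases Bool.or_eq_true_iff.mp hb with h | h
      · exact Or.inl (eq_of_beq h)
      · exact Or.inr (eq_of_beq h)
    rcases ht with h | h <;> subst h <;> simp [pvStepA, pvFirstTag] <;> rw [if_neg (by decide)] <;> simp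
  · by_cases h1 : PySem.Chars.startswith t.toList ['&'] = true
    · have h2 := pvSw_disj t.toList '&' '<' (by decide) h1
      have h3 := pvSw_disj t.toList '&' '!' (by decide) h1
      simp [pvStepA, pvFirstTag, hb, h1, h2, h3]
    · by_cases h2 : PySem.Chars.startswith t.toList ['<'] = true ∧
          PySem.Chars.endswith t.toList ['>'] = true
      · simp [pvStepA, pvFirstTag, hb, h1, h2]
      · by_cases h3 : PySem.Chars.startswith t.toList ['!'] = true
        · have h2' := pvSw_disj t.toList '!' '<' (by decide) h3
          have hlen : 0 < t.length := pvSw_len t.toList '!' h3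
          simp [pvStepA, pvFirstTag, hb, h1, h3, h2', hlen]
        · simp [pvStepA, pvFirstTag, hb, h1, h2, h3]

theorem pvFoldl_eq (l : List String) (a g : Option String) :
    l.foldl pvStepA (a, g) =
      ((pvFirstAnchor l.reverse).or a, (pvFirstTag l.reverse).or g) := by
  induction l generalizing a g with
  | nil => simp [pvFirstAnchor, pvFirstTag]
  | cons t ts ih =>
    simp only [List.foldl_cons, List.reverse_cons]
    have hstep : pvStepA (a, g) t = ((pvStepA (a, g) t).1, (pvStepA (a, g) t).2) := rfl
    rw [hstep, ih]
    rw [pvFirstAnchor_append, pvFirstTag_append, Option.or_assoc, Option.or_assoc,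
      pvStep_fst a g t, pvStep_snd a g t]

-- ===== VERDICT (by name: the statement is the Claim_ definition above) =====
theorem parse_props_spec : Claim_equal_parse_props := by
  intro tokens _
  unfold Spec_parse_props parse_props parse_props_alt
  rw [pvFoldl_eq]
  simp
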